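-- pv_equiv track=rewrite | github.com/esavela/bootcamp | substring.py | common_substr
-- ===== SOURCE A (Python) =====
-- def common_substr(seq1, seq2):
--     """Compares two sequences and returns the longest common,
--     contiguous substring"""
--
--     #Identify shorter sequence
--     if len(seq1) <= len(seq2):
--         short_s = seq1
--         short_s_2 = seq1
--         long_s = seq2
--     else:
--         short_s = seq2
--         short_s_2 = seq2
--         long_s = seq1
--
--     #Compare the substring, look for short string in longer string
--     for i, _ in enumerate(short_s):
--         while short_s not in long_s:
--             #if it's not in the longest string, trim the short string (end)
--             short_s = short_s[:-1]
--         else: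
--             common_str = short_s
--
--     for i, _ in enumerate(short_s_2):
--         while short_s_2 not in long_s:
--             #if it's not in the longest string, trim the short string (front)
--             short_s_2 = short_s_2[1:]
--         else:
--             common_str_2 = short_s_2
--
--     #Look at the two common strings found, output the longest
--
--     if common_str > common_str_2:
--         return "The longest common string is: " + common_str
--     elif common_str_2 > common_str:
--         return "The longest common string is: " + common_str_2
-- ===== SOURCE B (Python) =====
-- def common_substr(seq1, seq2):
--     """Compares two sequences and returns the longest common,
--     contiguous substring (B: binary search on the monotone
--     prefix/suffix length instead of trimming one char at a time)."""
--     if len(seq1) <= len(seq2):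
--         short_s, long_s = seq1, seq2
--     else:
--         short_s, long_s = seq2, seq1
--     n = len(short_s)
--
--     def max_true(f):
--         # largest k in [0, n] with f(k); f is monotone and f(0) is True
--         lo, hi = 0, n
--         while lo < hi:
--             mid = (lo + hi + 1) // 2
--             if f(mid):
--                 lo = mid
--             else:
--                 hi = mid - 1
--         return lo
--
--     p = short_s[:max_true(lambda k: short_s[:k] in long_s)]
--     s = short_s[n - max_true(lambda k: short_s[n - k:] in long_s):]
--
--     if p > s:
--         return "The longest common string is: " + p
--     elif s > p:
--         return "The longest common string is: " + s
-- ===== Notes on version B (the rewrite author's own statement) =====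
-- stated objective: faster
-- what changed: Instead of trimming the shorter string one character at a time (an O(m) trimming loop, repeated inside a redundant for-loop, with an O(n*m) substring test at each step), B binary-searches on the length of the contained prefix/suffix, which is monotone, doing O(log m) substring tests in total.
-- crash fix: When the shorter string is empty A raises UnboundLocalError (common_str is never assigned); B returns None there (prefix and suffix are both empty, so neither comparison fires). — e.g. on common_substr("", "ab"): A raises UnboundLocalError, B returns none
import Mathlib
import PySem

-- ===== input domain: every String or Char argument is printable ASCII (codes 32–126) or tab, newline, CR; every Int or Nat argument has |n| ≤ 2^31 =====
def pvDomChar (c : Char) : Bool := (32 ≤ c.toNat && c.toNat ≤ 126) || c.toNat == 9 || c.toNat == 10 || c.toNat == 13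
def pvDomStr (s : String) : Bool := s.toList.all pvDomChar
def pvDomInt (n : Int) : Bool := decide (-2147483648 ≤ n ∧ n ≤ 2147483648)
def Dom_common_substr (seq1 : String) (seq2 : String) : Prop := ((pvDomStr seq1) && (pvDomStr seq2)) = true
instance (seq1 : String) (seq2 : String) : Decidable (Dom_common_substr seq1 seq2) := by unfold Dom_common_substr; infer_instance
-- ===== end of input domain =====

-- B replaces A's char-by-char trimming loops by a binary search on the (monotone) length of
-- the contained prefix/suffix of the shorter string; equivalence is proved on nonempty inputs.


-- Python '<' on strings: strict lexicographic comparison of code points (exact; shared by both ports)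
def pyStrLt : List Char → List Char → Bool
  | _, [] => false
  | [], _ :: _ => true
  | a :: as, b :: bs =>
      if a.toNat < b.toNat then true
      else if b.toNat < a.toNat then false
      else pyStrLt as bs

-- ===== PORT A =====
-- 'while short_s not in long_s: short_s = short_s[:-1]'  (s[:-1] = dropLast).
-- fuel makes the loop total and structural; fuel = s.length always suffices because every
-- trim shortens s by one character and '' is contained in every string.
def trimEndF (long : List Char) : Nat → List Char → List Char
  | 0, s => s
  | fuel + 1, s => if PySem.Chars.isIn s long then s else trimEndF long fuel s.dropLast

def trimEnd (long s : List Char) : List Char := trimEndF long s.length s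

-- 'while short_s_2 not in long_s: short_s_2 = short_s_2[1:]'  (s[1:] = drop 1)
def trimFrontF (long : List Char) : Nat → List Char → List Char
  | 0, s => s
  | fuel + 1, s => if PySem.Chars.isIn s long then s else trimFrontF long fuel (s.drop 1)

def trimFront (long s : List Char) : List Char := trimFrontF long s.length s

-- one iteration of 'for i, _ in enumerate(short_s): while … else: common_str = short_s'
def stepEnd (long : List Char) (st : List Char × Option (List Char)) (_ : Char) :
    List Char × Option (List Char) :=
  let s' := trimEnd long st.1
  (s', some s')

def stepFront (long : List Char) (st : List Char × Option (List Char)) (_ : Char) :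
    List Char × Option (List Char) :=
  let s' := trimFront long st.1
  (s', some s')

def common_substr (seq1 : String) (seq2 : String) : Option String :=
  let short := if seq1.toList.length ≤ seq2.toList.length then seq1.toList else seq2.toList
  let long := if seq1.toList.length ≤ seq2.toList.length then seq2.toList else seq1.toList
  let st1 := short.foldl (stepEnd long) (short, none)
  let st2 := short.foldl (stepFront long) (short, none)
  match st1.2, st2.2 with
  | some c1, some c2 =>
      if pyStrLt c2 c1 then some (String.ofList ("The longest common string is: ".toList ++ c1))
      else if pyStrLt c1 c2 then some (String.ofList ("The longest common string is: ".toList ++ c2))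
      else none
  | _, _ => none  -- Python raises UnboundLocalError here (shorter string empty): excluded by Pre_

-- ===== PORT B =====
-- 'while lo < hi: mid = (lo+hi+1)//2; if f(mid): lo = mid else: hi = mid-1'
-- (fuel = hi - lo bounds the iteration count: the gap shrinks every round)
def pySearchF (f : Nat → Bool) : Nat → Nat → Nat → Nat
  | 0, lo, _ => lo
  | fuel + 1, lo, hi =>
      if lo < hi then
        let mid := (lo + hi + 1) / 2
        if f mid then pySearchF f fuel mid hi else pySearchF f fuel lo (mid - 1)
      else lo

def pySearch (f : Nat → Bool) (lo hi : Nat) : Nat := pySearchF f (hi - lo) lo hi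

def common_substr_alt (seq1 : String) (seq2 : String) : Option String :=
  let short := if seq1.toList.length ≤ seq2.toList.length then seq1.toList else seq2.toList
  let long := if seq1.toList.length ≤ seq2.toList.length then seq2.toList else seq1.toList
  let n := short.length
  -- Source B's slices are in range: short_s[:k] = take k, short_s[n-k:] = drop (n-k)
  let p := short.take (pySearch (fun k => PySem.Chars.isIn (short.take k) long) 0 n)
  let s := short.drop (n - pySearch (fun k => PySem.Chars.isIn (short.drop (n - k)) long) 0 n)
  if pyStrLt s p then some (String.ofList ("The longest common string is: ".toList ++ p))
  else if pyStrLt p s then some (String.ofList ("The longest common string is: ".toList ++ s))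
  else none

-- ===== PRECONDITION & SPEC =====
-- Pre_ excludes exactly the inputs where A raises UnboundLocalError: an empty seq1 or seq2
-- (the shorter string is then empty, its for-loops never run and common_str is unassigned).
def Pre_common_substr (seq1 : String) (seq2 : String) : Prop :=
  seq1.toList ≠ [] ∧ seq2.toList ≠ []
instance (seq1 : String) (seq2 : String) : Decidable (Pre_common_substr seq1 seq2) := by
  unfold Pre_common_substr; infer_instance

def pvWitness_common_substr : String × String := ("abcde", "xxcdeyyabq")

-- When seq1 or seq2 is empty A raises UnboundLocalError; B returns none there (theorem common_substr_raises).
def Raises_common_substr (seq1 : String) (seq2 : String) : Prop :=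
  seq1.toList = [] ∨ seq2.toList = []
instance (seq1 : String) (seq2 : String) : Decidable (Raises_common_substr seq1 seq2) := by
  unfold Raises_common_substr; infer_instance
def pvRaiseWitness_common_substr : String × String := ("", "ab")
def pvRaiseWitnessOut_common_substr : Option String := none

def Spec_common_substr (seq1 : String) (seq2 : String) (out : Option String) : Prop := out = common_substr_alt seq1 seq2
instance (seq1 : String) (seq2 : String) (out : Option String) : Decidable (Spec_common_substr seq1 seq2 out) := by unfold Spec_common_substr; infer_instance

-- ===== CLAIM (what is proved, stated in full; the proofs are below) =====
def Claim_equal_common_substr : Prop := ∀ (seq1 : String) (seq2 : String), Dom_common_substr seq1 seq2 → Pre_common_substr seq1 seq2 → Spec_common_substr seq1 seq2 (common_substr seq1 seq2)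

def Claim_raises_common_substr : Prop := (∀ (seq1 : String) (seq2 : String), Dom_common_substr seq1 seq2 → Raises_common_substr seq1 seq2 → ¬ Pre_common_substr seq1 seq2) ∧ (Dom_common_substr (pvRaiseWitness_common_substr.1) (pvRaiseWitness_common_substr.2) ∧ Raises_common_substr (pvRaiseWitness_common_substr.1) (pvRaiseWitness_common_substr.2) ∧ common_substr_alt (pvRaiseWitness_common_substr.1) (pvRaiseWitness_common_substr.2) = pvRaiseWitnessOut_common_substr)

-- ===== LEMMAS AND PROOFS =====

-- findGreatest only looks at the predicate's values up to n
theorem findGreatest_congr_le (P Q : Nat → Prop) [DecidablePred P] [DecidablePred Q]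
    (n : Nat) (h : ∀ k, k ≤ n → (P k ↔ Q k)) :
    Nat.findGreatest P n = Nat.findGreatest Q n := by
  induction n with
  | zero => rfl
  | succ n ih =>
      rw [Nat.findGreatest_succ, Nat.findGreatest_succ]
      by_cases hp : P (n + 1)
      · rw [if_pos hp, if_pos ((h (n + 1) le_rfl).mp hp)]
      · rw [if_neg hp, if_neg (fun hq => hp ((h (n + 1) le_rfl).mpr hq)),
          ih (fun k hk => h k (Nat.le_succ_of_le hk))]

-- findGreatest ignores a region where the predicate is false
theorem findGreatest_false_above (P : Nat → Prop) [DecidablePred P] :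
    ∀ n m, m ≤ n → (∀ k, m < k → k ≤ n → ¬ P k) →
    Nat.findGreatest P n = Nat.findGreatest P m := by
  intro n
  induction n with
  | zero => intro m hm _; interval_cases m; rfl
  | succ n ih =>
      intro m hm hfalse
      rcases Nat.eq_or_lt_of_le hm with h | h
      · rw [h]
      · have hmn : m ≤ n := by omega
        rw [Nat.findGreatest_succ, if_neg (hfalse (n + 1) (by omega) le_rfl)]
        exact ih m hmn (fun k h1 h2 => hfalse k h1 (by omega))

-- A's end-trimming loop computes the longest contained prefix
theorem trimEndF_eq (long : List Char) :
    ∀ fuel s, s.length ≤ fuel →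
    trimEndF long fuel s =
      s.take (Nat.findGreatest (fun k => PySem.Chars.isIn (s.take k) long = true) s.length) := by
  intro fuel
  induction fuel with
  | zero =>
      intro s hs
      have : s = [] := List.length_eq_zero_iff.mp (by omega)
      subst this; rfl
  | succ fuel ih =>
      intro s hs
      by_cases h : PySem.Chars.isIn s long = true
      · have hPn : PySem.Chars.isIn (s.take s.length) long = true := by
          rw [List.take_length]; exact h
        have hge := Nat.le_findGreatest (P := fun k => PySem.Chars.isIn (s.take k) long = true)
          (le_refl s.length) hPn
        have hle := Nat.findGreatest_le (P := fun k => PySem.Chars.isIn (s.take k) long = true) s.length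
        have hG : Nat.findGreatest (fun k => PySem.Chars.isIn (s.take k) long = true) s.length
            = s.length := le_antisymm hle hge
        rw [trimEndF, if_pos h, hG, List.take_length]
      · have hne : s ≠ [] := by
          rintro rfl; exact h (PySem.Chars.isIn_nil long)
        have hpos : 0 < s.length := List.length_pos_iff.mpr hne
        have hdl : s.dropLast.length = s.length - 1 := by simp
        have ihd := ih s.dropLast (by omega)
        -- predicates agree below s.length - 1
        have hcongr : Nat.findGreatest (fun k => PySem.Chars.isIn (s.dropLast.take k) long = true)
              s.dropLast.length
            = Nat.findGreatest (fun k => PySem.Chars.isIn (s.take k) long = true) (s.length - 1) := by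
          rw [hdl]
          apply findGreatest_congr_le
          intro k hk
          rw [List.dropLast_eq_take, List.take_take, Nat.min_eq_left hk]
        -- dropping the false top value
        obtain ⟨m, hm⟩ : ∃ m, s.length = m + 1 := ⟨s.length - 1, by omega⟩
        have htop : ¬ PySem.Chars.isIn (s.take s.length) long = true := by
          rw [List.take_length]; exact h
        have hdropTop : Nat.findGreatest (fun k => PySem.Chars.isIn (s.take k) long = true) s.length
            = Nat.findGreatest (fun k => PySem.Chars.isIn (s.take k) long = true) (s.length - 1) := by
          rw [hm, Nat.findGreatest_succ, if_neg (by rw [← hm]; exact htop)]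
          norm_num
        have hGle : Nat.findGreatest (fun k => PySem.Chars.isIn (s.take k) long = true) (s.length - 1)
            ≤ s.length - 1 := Nat.findGreatest_le _
        rw [trimEndF, if_neg h, ihd, hcongr, hdropTop,
          List.dropLast_eq_take, List.take_take,
          Nat.min_eq_left hGle]

-- A's front-trimming loop computes the longest contained suffix
theorem trimFrontF_eq (long : List Char) :
    ∀ fuel s, s.length ≤ fuel →
    trimFrontF long fuel s =
      s.drop (s.length -
        Nat.findGreatest (fun k => PySem.Chars.isIn (s.drop (s.length - k)) long = true) s.length) := by
  intro fuel
  induction fuel with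
  | zero =>
      intro s hs
      have : s = [] := List.length_eq_zero_iff.mp (by omega)
      subst this; rfl
  | succ fuel ih =>
      intro s hs
      by_cases h : PySem.Chars.isIn s long = true
      · have hPn : PySem.Chars.isIn (s.drop (s.length - s.length)) long = true := by
          simpa using h
        have hge := Nat.le_findGreatest
          (P := fun k => PySem.Chars.isIn (s.drop (s.length - k)) long = true)
          (le_refl s.length) hPn
        have hle := Nat.findGreatest_le
          (P := fun k => PySem.Chars.isIn (s.drop (s.length - k)) long = true) s.length
        have hG : Nat.findGreatest (fun k => PySem.Chars.isIn (s.drop (s.length - k)) long = true)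
            s.length = s.length := le_antisymm hle hge
        rw [trimFrontF, if_pos h, hG]
        simp
      · have hne : s ≠ [] := by
          rintro rfl; exact h (PySem.Chars.isIn_nil long)
        have hpos : 0 < s.length := List.length_pos_iff.mpr hne
        have hdl : (s.drop 1).length = s.length - 1 := by simp
        have ihd := ih (s.drop 1) (by omega)
        have hcongr : Nat.findGreatest
              (fun k => PySem.Chars.isIn ((s.drop 1).drop ((s.drop 1).length - k)) long = true)
              (s.drop 1).length
            = Nat.findGreatest (fun k => PySem.Chars.isIn (s.drop (s.length - k)) long = true)
              (s.length - 1) := by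
          rw [hdl]
          apply findGreatest_congr_le
          intro k hk
          rw [List.drop_drop]
          have : 1 + (s.length - 1 - k) = s.length - k := by omega
          rw [this]
        have htop : ¬ PySem.Chars.isIn (s.drop (s.length - s.length)) long = true := by
          simpa using h
        obtain ⟨m, hm⟩ : ∃ m, s.length = m + 1 := ⟨s.length - 1, by omega⟩
        have hdropTop : Nat.findGreatest (fun k => PySem.Chars.isIn (s.drop (s.length - k)) long = true)
              s.length
            = Nat.findGreatest (fun k => PySem.Chars.isIn (s.drop (s.length - k)) long = true)
              (s.length - 1) := by
          rw [hm, Nat.findGreatest_succ, if_neg (by rw [← hm]; exact htop)]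
          norm_num
        have hGle : Nat.findGreatest (fun k => PySem.Chars.isIn (s.drop (s.length - k)) long = true)
            (s.length - 1) ≤ s.length - 1 := Nat.findGreatest_le _
        rw [trimFrontF, if_neg h, ihd, hcongr, hdropTop, List.drop_drop]
        congr 1; omega

-- the trimming loops stop at a contained string
theorem trimEndF_isIn (long : List Char) :
    ∀ fuel s, s.length ≤ fuel → PySem.Chars.isIn (trimEndF long fuel s) long = true := by
  intro fuel
  induction fuel with
  | zero =>
      intro s hs
      have : s = [] := List.length_eq_zero_iff.mp (by omega)
      subst this; exact PySem.Chars.isIn_nil long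
  | succ fuel ih =>
      intro s hs
      by_cases h : PySem.Chars.isIn s long = true
      · rw [trimEndF, if_pos h]; exact h
      · have hne : s ≠ [] := by rintro rfl; exact h (PySem.Chars.isIn_nil long)
        have hpos : 0 < s.length := List.length_pos_iff.mpr hne
        rw [trimEndF, if_neg h]
        exact ih s.dropLast (by simp; omega)

theorem trimFrontF_isIn (long : List Char) :
    ∀ fuel s, s.length ≤ fuel → PySem.Chars.isIn (trimFrontF long fuel s) long = true := by
  intro fuel
  induction fuel with
  | zero =>
      intro s hs
      have : s = [] := List.length_eq_zero_iff.mp (by omega)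
      subst this; exact PySem.Chars.isIn_nil long
  | succ fuel ih =>
      intro s hs
      by_cases h : PySem.Chars.isIn s long = true
      · rw [trimFrontF, if_pos h]; exact h
      · have hne : s ≠ [] := by rintro rfl; exact h (PySem.Chars.isIn_nil long)
        have hpos : 0 < s.length := List.length_pos_iff.mpr hne
        rw [trimFrontF, if_neg h]
        exact ih (s.drop 1) (by simp; omega)

-- a contained string is a fixed point of the trimming loop
theorem trimEnd_fix (long s : List Char) (h : PySem.Chars.isIn s long = true) :
    trimEnd long s = s := by
  unfold trimEnd
  cases hs : s.length with
  | zero => rfl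
  | succ m => rw [trimEndF, if_pos h]

theorem trimFront_fix (long s : List Char) (h : PySem.Chars.isIn s long = true) :
    trimFront long s = s := by
  unfold trimFront
  cases hs : s.length with
  | zero => rfl
  | succ m => rw [trimFrontF, if_pos h]

-- the for-loop stabilises after its first iteration
theorem foldl_stepEnd_stable (long : List Char) :
    ∀ (l : List Char) (s : List Char), PySem.Chars.isIn s long = true →
    l.foldl (stepEnd long) (s, some s) = (s, some s) := by
  intro l
  induction l with
  | nil => intro s _; rfl
  | cons c cs ih =>
      intro s hs
      have : stepEnd long (s, some s) c = (s, some s) := by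
        simp [stepEnd, trimEnd_fix long s hs]
      rw [List.foldl_cons, this, ih s hs]

theorem foldl_stepFront_stable (long : List Char) :
    ∀ (l : List Char) (s : List Char), PySem.Chars.isIn s long = true →
    l.foldl (stepFront long) (s, some s) = (s, some s) := by
  intro l
  induction l with
  | nil => intro s _; rfl
  | cons c cs ih =>
      intro s hs
      have : stepFront long (s, some s) c = (s, some s) := by
        simp [stepFront, trimFront_fix long s hs]
      rw [List.foldl_cons, this, ih s hs]

theorem foldl_stepEnd (long : List Char) (l s : List Char) (hl : l ≠ []) (o : Option (List Char)) :
    l.foldl (stepEnd long) (s, o) = (trimEnd long s, some (trimEnd long s)) := by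
  cases l with
  | nil => exact absurd rfl hl
  | cons c cs =>
      rw [List.foldl_cons]
      have h1 : stepEnd long (s, o) c = (trimEnd long s, some (trimEnd long s)) := rfl
      rw [h1]
      exact foldl_stepEnd_stable long cs (trimEnd long s) (trimEndF_isIn long s.length s le_rfl)

theorem foldl_stepFront (long : List Char) (l s : List Char) (hl : l ≠ []) (o : Option (List Char)) :
    l.foldl (stepFront long) (s, o) = (trimFront long s, some (trimFront long s)) := by
  cases l with
  | nil => exact absurd rfl hl
  | cons c cs =>
      rw [List.foldl_cons]
      have h1 : stepFront long (s, o) c = (trimFront long s, some (trimFront long s)) := rfl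
      rw [h1]
      exact foldl_stepFront_stable long cs (trimFront long s) (trimFrontF_isIn long s.length s le_rfl)

-- B's binary search computes findGreatest for a monotone predicate
theorem pySearchF_eq (f : Nat → Bool)
    (hmono : ∀ j k, j ≤ k → f k = true → f j = true) :
    ∀ fuel lo hi, hi - lo ≤ fuel → lo ≤ hi → f lo = true →
    pySearchF f fuel lo hi = Nat.findGreatest (fun k => f k = true) hi := by
  intro fuel
  induction fuel with
  | zero =>
      intro lo hi hfuel hle hflo
      have : lo = hi := by omega
      subst this
      have hge := Nat.le_findGreatest (P := fun k => f k = true) (le_refl lo) hflo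
      have hub := Nat.findGreatest_le (P := fun k => f k = true) lo
      rw [pySearchF]; omega
  | succ fuel ih =>
      intro lo hi hfuel hle hflo
      rw [pySearchF]
      by_cases hlt : lo < hi
      · rw [if_pos hlt]
        have hmid1 : lo < (lo + hi + 1) / 2 := by omega
        have hmid2 : (lo + hi + 1) / 2 ≤ hi := by omega
        by_cases hf : f ((lo + hi + 1) / 2) = true
        · simp only [hf, if_true]
          exact ih ((lo + hi + 1) / 2) hi (by omega) hmid2 hf
        · simp only [hf]
          have hrec := ih lo ((lo + hi + 1) / 2 - 1) (by omega) (by omega) hflo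
          rw [hrec]
          exact (findGreatest_false_above (fun k => f k = true) hi ((lo + hi + 1) / 2 - 1)
            (by omega)
            (fun k h1 h2 hk => hf (hmono _ k (by omega) hk))).symm
      · rw [if_neg hlt]
        have : lo = hi := by omega
        subst this
        have hge := Nat.le_findGreatest (P := fun k => f k = true) (le_refl lo) hflo
        have hub := Nat.findGreatest_le (P := fun k => f k = true) lo
        omega

-- containment of a prefix of the shorter string is monotone in its length
theorem take_mono (short long : List Char) (j k : Nat) (hjk : j ≤ k)
    (h : PySem.Chars.isIn (short.take k) long = true) :
    PySem.Chars.isIn (short.take j) long = true := by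
  rw [PySem.Chars.isIn_iff_infix] at h ⊢
  refine List.IsInfix.trans ?_ h
  have : (short.take k).take j = short.take j := by
    rw [List.take_take, Nat.min_eq_left hjk]
  rw [← this]
  exact (List.take_prefix j (short.take k)).isInfix

theorem drop_mono (short long : List Char) (n j k : Nat) (hjk : j ≤ k)
    (h : PySem.Chars.isIn (short.drop (n - k)) long = true) :
    PySem.Chars.isIn (short.drop (n - j)) long = true := by
  rw [PySem.Chars.isIn_iff_infix] at h ⊢
  refine List.IsInfix.trans ?_ h
  have : (short.drop (n - k)).drop ((n - j) - (n - k)) = short.drop (n - j) := by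
    rw [List.drop_drop]; congr 1; omega
  rw [← this]
  exact (List.drop_suffix ((n - j) - (n - k)) (short.drop (n - k))).isInfix

-- the common core: for a nonempty shorter string, A's pair equals B's pair, hence same output
theorem core_eq (short long : List Char) (hne : short ≠ []) :
    (match (short.foldl (stepEnd long) (short, none)).2,
           (short.foldl (stepFront long) (short, none)).2 with
     | some c1, some c2 =>
        if pyStrLt c2 c1 then some (String.ofList ("The longest common string is: ".toList ++ c1))
        else if pyStrLt c1 c2 then some (String.ofList ("The longest common string is: ".toList ++ c2))
        else none
     | _, _ => none) =
    (let n := short.length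
     let p := short.take (pySearch (fun k => PySem.Chars.isIn (short.take k) long) 0 n)
     let s := short.drop (n - pySearch (fun k => PySem.Chars.isIn (short.drop (n - k)) long) 0 n)
     if pyStrLt s p then some (String.ofList ("The longest common string is: ".toList ++ p))
     else if pyStrLt p s then some (String.ofList ("The longest common string is: ".toList ++ s))
     else none) := by
  rw [foldl_stepEnd long short short hne none, foldl_stepFront long short short hne none]
  have hA1 : trimEnd long short =
      short.take (Nat.findGreatest (fun k => PySem.Chars.isIn (short.take k) long = true)
        short.length) :=
    trimEndF_eq long short.length short le_rfl
  have hA2 : trimFront long short =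
      short.drop (short.length -
        Nat.findGreatest (fun k => PySem.Chars.isIn (short.drop (short.length - k)) long = true)
        short.length) :=
    trimFrontF_eq long short.length short le_rfl
  have hB1 : pySearch (fun k => PySem.Chars.isIn (short.take k) long) 0 short.length =
      Nat.findGreatest (fun k => PySem.Chars.isIn (short.take k) long = true) short.length := by
    unfold pySearch
    exact pySearchF_eq _ (fun j k hjk hk => take_mono short long j k hjk hk)
      (short.length - 0) 0 short.length le_rfl (Nat.zero_le _)
      (by simp [PySem.Chars.isIn_nil])
  have hB2 : pySearch (fun k => PySem.Chars.isIn (short.drop (short.length - k)) long) 0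
        short.length =
      Nat.findGreatest (fun k => PySem.Chars.isIn (short.drop (short.length - k)) long = true)
        short.length := by
    unfold pySearch
    exact pySearchF_eq _ (fun j k hjk hk => drop_mono short long short.length j k hjk hk)
      (short.length - 0) 0 short.length le_rfl (Nat.zero_le _)
      (by simp [PySem.Chars.isIn_nil])
  simp only [hB1, hB2, ← hA1, ← hA2]

-- ===== VERDICT (by name: the statement is the Claim_ definition above) =====
theorem common_substr_spec : Claim_equal_common_substr := by
  intro seq1 seq2 _ hpre
  unfold Spec_common_substr common_substr common_substr_alt
  by_cases hc : seq1.toList.length ≤ seq2.toList.length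
  · simp only [if_pos hc]
    exact core_eq seq1.toList seq2.toList hpre.1
  · simp only [if_neg hc]
    exact core_eq seq2.toList seq1.toList hpre.2

@[simp]
theorem common_substr_raises : Claim_raises_common_substr := by
  unfold Claim_raises_common_substr
  refine ⟨?_, by decide⟩
  intro s1 s2 _ h hp
  unfold Raises_common_substr at h
  exact h.elim (fun e => hp.1 e) (fun e => hp.2 e)
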